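-- pv_equiv track=rewrite | github.com/SaikrishnanShankar/Game-Development | HW1/hw1_navmesh_all/mycreatepathnetwork.py | remove_smaller_component
-- ===== SOURCE A (Python) =====
-- from collections import defaultdict, deque
--
-- def remove_smaller_component(nodes, edges):
--     graph = defaultdict(list)
--     for edge in edges:
--         graph[edge[0]].append(edge[1])
--         graph[edge[1]].append(edge[0])
--
--     # Find connected components using BFS
--     visited = set()
--     components = []
--
--     def bfs(start_node):
--         queue = deque([start_node])
--         component = set()
--         while queue:
--             node = queue.popleft()
--             if node not in visited:
--                 visited.add(node)
--                 component.add(node)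
--                 queue.extend(graph[node])
--         return component
--
--     for node in nodes:
--         if node not in visited:
--             component = bfs(node)
--             components.append(component)
--
--     # If there are exactly two components, remove the smaller one
--     if len(components) == 2:
--         smaller_component = min(components, key=len)
--         nodes = [node for node in nodes if node not in smaller_component]
--         edges = [edge for edge in edges if edge[0] not in smaller_component and edge[1] not in smaller_component]
--
--     return nodes, edges
-- ===== SOURCE B (Python) =====
-- def remove_smaller_component(nodes, edges):
--     # Components by repeated edge relaxation (no adjacency dict, no BFS queue):
--     # grow each component by sweeping the edge list until a fixed point.
--     visited = set()
--     components = []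
--     for start in nodes:
--         if start in visited:
--             continue
--         comp = [start]
--         changed = True
--         while changed:
--             changed = False
--             for a, b in edges:
--                 if a in comp and b not in visited and b not in comp:
--                     comp.append(b)
--                     changed = True
--                 if b in comp and a not in visited and a not in comp:
--                     comp.append(a)
--                     changed = True
--         visited.update(comp)
--         components.append(comp)
--     if len(components) == 2:
--         smaller = components[1] if len(components[1]) < len(components[0]) else components[0]
--         nodes = [n for n in nodes if n not in smaller]
--         edges = [e for e in edges if e[0] not in smaller and e[1] not in smaller]
--     return nodes, edges
-- ===== Notes on version B (the rewrite author's own statement) =====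
-- stated objective: alternative
-- what changed: Replaces A's adjacency-dict + BFS-queue component search with dict-free edge-list relaxation: each component is grown by sweeping the edge list to a fixed point, and the smaller of exactly two components is picked by direct index comparison instead of min(key=len).
import Mathlib
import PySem

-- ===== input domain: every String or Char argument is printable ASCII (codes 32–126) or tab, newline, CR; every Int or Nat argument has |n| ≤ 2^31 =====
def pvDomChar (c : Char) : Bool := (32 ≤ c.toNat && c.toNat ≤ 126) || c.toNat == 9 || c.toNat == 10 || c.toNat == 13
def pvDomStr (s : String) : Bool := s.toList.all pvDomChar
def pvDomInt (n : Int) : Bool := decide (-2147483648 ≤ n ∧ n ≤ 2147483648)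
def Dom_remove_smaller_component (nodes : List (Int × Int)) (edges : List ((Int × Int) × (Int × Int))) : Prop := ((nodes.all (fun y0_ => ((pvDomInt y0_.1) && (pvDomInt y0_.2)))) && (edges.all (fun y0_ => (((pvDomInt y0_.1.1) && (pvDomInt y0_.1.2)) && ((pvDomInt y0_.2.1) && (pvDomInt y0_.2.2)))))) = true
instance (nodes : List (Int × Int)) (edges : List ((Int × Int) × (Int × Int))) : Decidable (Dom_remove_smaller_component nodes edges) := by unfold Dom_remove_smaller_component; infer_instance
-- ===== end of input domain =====

-- B is an alternative exact re-implementation: components are grown by sweeping the raw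
-- edge list to a fixed point (no adjacency dict, no BFS queue); the smaller of exactly two
-- components is chosen by direct index comparison instead of min(key=len).

abbrev PvV := Int × Int

-- ===== PORT A =====

-- graph = defaultdict(list); for edge in edges: graph[edge[0]].append(edge[1]); graph[edge[1]].append(edge[0])
def pvGraph (edges : List (PvV × PvV)) : PySem.Dict PvV (List PvV) :=
  edges.foldl
    (fun g e => (g.modify e.1 [] (fun l => l ++ [e.2])).modify e.2 [] (fun l => l ++ [e.1]))
    PySem.Dict.empty

-- helper lemmas used by the ports' termination proofs (cited in decreasing_by)
theorem pv_filter_le {α : Type} (l : List α) (p q : α → Bool)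
    (himp : ∀ y ∈ l, p y = true → q y = true) :
    (l.filter p).length ≤ (l.filter q).length := by
  induction l with
  | nil => simp
  | cons a l ih =>
    have ih' := ih (fun y hy => himp y (List.mem_cons.2 (Or.inr hy)))
    rcases hp : p a with _ | _
    · rcases hq : q a with _ | _
      · simpa [List.filter_cons, hp, hq] using ih'
      · simpa [List.filter_cons, hp, hq] using Nat.le_succ_of_le ih'
    · have hqt := himp a List.mem_cons_self hp
      simpa [List.filter_cons, hp, hqt] using ih' 

theorem pv_filter_lt {α : Type} (l : List α) (p q : α → Bool)
    (himp : ∀ y ∈ l, p y = true → q y = true)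
    (x : α) (hxl : x ∈ l) (hpx : p x = false) (hqx : q x = true) :
    (l.filter p).length < (l.filter q).length := by
  induction l with
  | nil => simp at hxl
  | cons a l ih =>
    have hle := pv_filter_le l p q (fun y hy => himp y (List.mem_cons.2 (Or.inr hy)))
    rcases List.mem_cons.1 hxl with rfl | hxl'
    · simp [List.filter_cons, hpx, hqx]
      exact hle
    · have ih' := ih (fun y hy => himp y (List.mem_cons.2 (Or.inr hy))) hxl'
      rcases hp : p a with _ | _
      · rcases hq : q a with _ | _
        · simpa [List.filter_cons, hp, hq] using ih'
        · simpa [List.filter_cons, hp, hq] using Nat.lt_succ_of_lt ih'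
      · have hqt := himp a List.mem_cons_self hp
        simpa [List.filter_cons, hp, hqt] using ih' 

-- BFS worklist of A: queue, shared visited set, current component
def pvBfs (g : PySem.Dict PvV (List PvV)) (q : List PvV) (vis comp : PySem.Set PvV) :
    PySem.Set PvV × PySem.Set PvV :=
  match q with
  | [] => (vis, comp)
  | n :: q' =>
    if h : n ∈ vis then pvBfs g q' vis comp
    else pvBfs g (q' ++ g.getD n []) (PySem.Set.add vis n) (PySem.Set.add comp n)
termination_by (((g.keys).filter (fun x => decide (x ∉ vis))).length, q.length)
decreasing_by
  · exact Prod.Lex.right _ (by simp)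
  · rw [Prod.lex_def]
    dsimp only
    by_cases hk : n ∈ g.keys
    · refine Or.inl (pv_filter_lt g.keys _ _ ?_ n hk ?_ ?_)
      · intro y hy hp
        simp only [decide_eq_true_eq, PySem.Set.mem_add] at hp ⊢
        exact fun hv => hp (Or.inl hv)
      · simp [PySem.Set.mem_add]
      · simpa using h
    · refine Or.inr ⟨?_, ?_⟩
      · refine congrArg List.length (List.filter_congr ?_)
        intro x hx
        have hne : x ≠ n := fun e => hk (e ▸ hx)
        simp [PySem.Set.mem_add, hne]
      · have hget : g.getD n [] = [] := by
          apply PySem.Dict.getD_of_not_contains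
          rw [← Bool.not_eq_true, PySem.Dict.contains_iff_mem_keys]; exact hk
        simp [hget]

def remove_smaller_component (nodes : List (Int × Int)) (edges : List ((Int × Int) × (Int × Int))) :
    (List (Int × Int)) × (List ((Int × Int) × (Int × Int))) :=
  let graph := pvGraph edges
  let st := nodes.foldl
    (fun (st : PySem.Set PvV × List (PySem.Set PvV)) node =>
      if node ∈ st.1 then st
      else
        let r := pvBfs graph [node] st.1 PySem.Set.empty
        (r.1, st.2 ++ [r.2]))
    (PySem.Set.empty, [])
  let components := st.2
  if components.length = 2 then
    let smaller := (PySem.List.min? components (fun c => PySem.Set.len c)).getD PySem.Set.empty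
    (nodes.filter (fun n => !(PySem.Set.contains smaller n)),
     edges.filter (fun e => !(PySem.Set.contains smaller e.1) && !(PySem.Set.contains smaller e.2)))
  else (nodes, edges)

-- ===== PORT B =====

def pvEndpoints (edges : List (PvV × PvV)) : List PvV := edges.flatMap (fun e => [e.1, e.2])

-- one pass over the edge list: 'for a, b in edges: …' body of Source B (the two ifs in order)
def pvStepF2 (vis : PySem.Set PvV) (c1 : List PvV) (e : PvV × PvV) : List PvV :=
  if e.2 ∈ c1 ∧ e.1 ∉ vis ∧ e.1 ∉ c1 then c1 ++ [e.1] else c1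

def pvStepF (vis : PySem.Set PvV) (c : List PvV) (e : PvV × PvV) : List PvV :=
  pvStepF2 vis (if e.1 ∈ c ∧ e.2 ∉ vis ∧ e.2 ∉ c then c ++ [e.2] else c) e

theorem pvEndpoints_cons (e : PvV × PvV) (l : List (PvV × PvV)) :
    pvEndpoints (e :: l) = e.1 :: e.2 :: pvEndpoints l := by simp [pvEndpoints]

-- shape lemmas used by pvSweep's termination proof
theorem pvStepF2_shape (vis : PySem.Set PvV) (c1 : List PvV) (e : PvV × PvV) :
    ∃ u, pvStepF2 vis c1 e = c1 ++ u ∧ ∀ x ∈ u, x ∉ c1 ∧ x = e.1 := by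
  unfold pvStepF2
  by_cases h : e.2 ∈ c1 ∧ e.1 ∉ vis ∧ e.1 ∉ c1
  · exact ⟨[e.1], by rw [if_pos h], by simpa using h.2.2⟩
  · exact ⟨[], by rw [if_neg h, List.append_nil], by simp⟩

theorem pvStepF_shape (vis : PySem.Set PvV) (c : List PvV) (e : PvV × PvV) :
    ∃ u, pvStepF vis c e = c ++ u ∧ ∀ x ∈ u, x ∉ c ∧ (x = e.1 ∨ x = e.2) := by
  unfold pvStepF
  by_cases h1 : e.1 ∈ c ∧ e.2 ∉ vis ∧ e.2 ∉ c
  · rw [if_pos h1]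
    obtain ⟨u, hu, hup⟩ := pvStepF2_shape vis (c ++ [e.2]) e
    refine ⟨e.2 :: u, by simpa using hu, ?_⟩
    intro x hx
    rcases List.mem_cons.1 hx with rfl | hxu
    · exact ⟨h1.2.2, Or.inr rfl⟩
    · obtain ⟨hnc, hx1⟩ := hup x hxu
      exact ⟨fun hc => hnc (List.mem_append.2 (Or.inl hc)), Or.inl hx1⟩
  · rw [if_neg h1]
    obtain ⟨u, hu, hup⟩ := pvStepF2_shape vis c e
    exact ⟨u, hu, fun x hx => ⟨(hup x hx).1, Or.inl (hup x hx).2⟩⟩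

theorem pvFold_shape (vis : PySem.Set PvV) :
    ∀ (l : List (PvV × PvV)) (c : List PvV),
      ∃ t, l.foldl (pvStepF vis) c = c ++ t ∧ ∀ x ∈ t, x ∉ c ∧ x ∈ pvEndpoints l := by
  intro l
  induction l with
  | nil => exact fun c => ⟨[], by simp⟩
  | cons e l ih =>
    intro c
    obtain ⟨u, hu, hup⟩ := pvStepF_shape vis c e
    obtain ⟨t, ht, htp⟩ := ih (pvStepF vis c e)
    refine ⟨u ++ t, ?_, ?_⟩
    · rw [List.foldl_cons, ht, hu, List.append_assoc]
    · intro x hx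
      rw [pvEndpoints_cons]
      rcases List.mem_append.1 hx with hxu | hxt
      · obtain ⟨h1, h2⟩ := hup x hxu
        refine ⟨h1, ?_⟩
        rcases h2 with rfl | rfl
        · exact List.mem_cons_self
        · exact List.mem_cons.2 (Or.inr List.mem_cons_self)
      · obtain ⟨h1, h2⟩ := htp x hxt
        rw [hu] at h1
        exact ⟨fun hc => h1 (List.mem_append.2 (Or.inl hc)),
          List.mem_cons.2 (Or.inr (List.mem_cons.2 (Or.inr h2)))⟩

-- 'while changed: …' loop of Source B: sweep the edges until a fixed point
def pvSweep (edges : List (PvV × PvV)) (vis : PySem.Set PvV) (comp : List PvV) : List PvV :=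
  if h : edges.foldl (pvStepF vis) comp = comp then comp
  else pvSweep edges vis (edges.foldl (pvStepF vis) comp)
termination_by ((pvEndpoints edges).filter (fun x => decide (x ∉ comp))).length
decreasing_by
  simp only [List.foldl_attach] at h ⊢
  obtain ⟨t, ht, htp⟩ := pvFold_shape vis edges comp
  cases t with
  | nil => rw [List.append_nil] at ht; exact absurd ht h
  | cons x t' =>
    have hx := htp x (List.mem_cons_self)
    refine pv_filter_lt (pvEndpoints edges) _ _ ?_ x hx.2 ?_ ?_
    · intro y hy hp
      simp only [decide_eq_true_eq] at hp ⊢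
      intro hyc
      exact hp (by rw [ht]; exact List.mem_append.2 (Or.inl hyc))
    · simp only [decide_eq_false_iff_not, not_not]
      rw [ht]; exact List.mem_append.2 (Or.inr List.mem_cons_self)
    · simpa using hx.1

def remove_smaller_component_alt (nodes : List (Int × Int)) (edges : List ((Int × Int) × (Int × Int))) :
    (List (Int × Int)) × (List ((Int × Int) × (Int × Int))) :=
  let st := nodes.foldl
    (fun (st : PySem.Set PvV × List (List PvV)) node =>
      if node ∈ st.1 then st
      else
        let comp := pvSweep edges st.1 [node]
        (PySem.Set.update st.1 comp, st.2 ++ [comp]))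
    (PySem.Set.empty, [])
  let components := st.2
  if components.length = 2 then
    let smaller :=
      if PySem.List.len (components.getD 1 []) < PySem.List.len (components.getD 0 [])
      then components.getD 1 [] else components.getD 0 []
    (nodes.filter (fun n => decide (n ∉ smaller)),
     edges.filter (fun e => decide (e.1 ∉ smaller) && decide (e.2 ∉ smaller)))
  else (nodes, edges)

-- ===== PRECONDITION & SPEC =====
def Spec_remove_smaller_component (nodes : List (Int × Int)) (edges : List ((Int × Int) × (Int × Int))) (out : (List (Int × Int)) × (List ((Int × Int) × (Int × Int)))) : Prop := out = remove_smaller_component_alt nodes edges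
instance (nodes : List (Int × Int)) (edges : List ((Int × Int) × (Int × Int))) (out : (List (Int × Int)) × (List ((Int × Int) × (Int × Int)))) : Decidable (Spec_remove_smaller_component nodes edges out) := by unfold Spec_remove_smaller_component; infer_instance

-- ===== CLAIM (what is proved, stated in full; the proofs are below) =====
def Claim_equal_remove_smaller_component : Prop := ∀ (nodes : List (Int × Int)) (edges : List ((Int × Int) × (Int × Int))), Dom_remove_smaller_component nodes edges → Spec_remove_smaller_component nodes edges (remove_smaller_component nodes edges)

-- ===== LEMMAS AND PROOFS =====

-- undirected adjacency described by the edge list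
def PvAdj (edges : List (PvV × PvV)) (u v : PvV) : Prop :=
  ∃ e ∈ edges, (e.1 = u ∧ e.2 = v) ∨ (e.1 = v ∧ e.2 = u)

-- reachability from s along edges, never stepping onto a vertex of vis
inductive PvReach (edges : List (PvV × PvV)) (vis : List PvV) (s : PvV) : PvV → Prop
  | base : PvReach edges vis s s
  | step {u v : PvV} : PvReach edges vis s u → PvAdj edges u v → v ∉ vis → PvReach edges vis s v

theorem pvReach_congr {edges : List (PvV × PvV)} {vis vis' : List PvV} {s x : PvV}
    (h : ∀ y : PvV, y ∈ vis ↔ y ∈ vis') (hr : PvReach edges vis s x) : PvReach edges vis' s x := by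
  induction hr with
  | base => exact PvReach.base
  | step _ ha hv ih => exact PvReach.step ih ha (fun hx => hv ((h _).2 hx))

theorem pvReach_subset_closed {edges : List (PvV × PvV)} {vis : List PvV} {s : PvV} {R : List PvV}
    (hsR : s ∈ R) (hcl : ∀ u ∈ R, ∀ v : PvV, PvAdj edges u v → v ∉ vis → v ∈ R) :
    ∀ x : PvV, PvReach edges vis s x → x ∈ R := by
  intro x hx
  induction hx with
  | base => exact hsR
  | step _ ha hv ih => exact hcl _ ih _ ha hv

theorem pv_len_eq {l₁ l₂ : List PvV} (h1 : l₁.Nodup) (h2 : l₂.Nodup)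
    (h : ∀ x : PvV, x ∈ l₁ ↔ x ∈ l₂) : l₁.length = l₂.length :=
  ((List.perm_ext_iff_of_nodup h1 h2).2 h).length_eq

-- A's defaultdict adjacency realises PvAdj
theorem pvGraph_fold (l : List (PvV × PvV)) :
    ∀ (g : PySem.Dict PvV (List PvV)) (u v : PvV),
      v ∈ (l.foldl
            (fun g e => (g.modify e.1 [] (fun t => t ++ [e.2])).modify e.2 [] (fun t => t ++ [e.1]))
            g).getD u []
        ↔ v ∈ g.getD u [] ∨ PvAdj l u v := by
  induction l with
  | nil => intro g u v; simp [PvAdj]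
  | cons e l ih =>
    intro g u v
    rw [List.foldl_cons, ih]
    have hadj : PvAdj (e :: l) u v ↔
        ((e.1 = u ∧ e.2 = v) ∨ (e.1 = v ∧ e.2 = u)) ∨ PvAdj l u v := by
      simp [PvAdj, List.mem_cons, or_and_right, exists_or, exists_eq_or_imp]
    rw [hadj]
    simp only [PySem.Dict.getD_modify]
    split_ifs with h1 h2 h2 <;> simp_all [List.mem_append] <;> tauto

theorem pvGraph_spec (edges : List (PvV × PvV)) (u v : PvV) :
    v ∈ (pvGraph edges).getD u [] ↔ PvAdj edges u v := by
  have h := pvGraph_fold edges PySem.Dict.empty u v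
  simpa [pvGraph] using h

-- the central BFS lemma for A
theorem pvBfs_spec (g : PySem.Dict PvV (List PvV)) (edges : List (PvV × PvV))
    (hg : ∀ u v : PvV, v ∈ g.getD u [] ↔ PvAdj edges u v)
    (V0 : List PvV) (s : PvV) (hs : s ∉ V0) :
    ∀ (q : List PvV) (vis comp : PySem.Set PvV),
      (∀ x : PvV, x ∈ vis ↔ x ∈ V0 ∨ x ∈ comp) →
      (∀ x ∈ comp, PvReach edges V0 s x) →
      (∀ x ∈ q, x ∈ V0 ∨ PvReach edges V0 s x) →
      (∀ u ∈ comp, ∀ v : PvV, PvAdj edges u v → v ∈ vis ∨ v ∈ q) →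
      (s ∈ vis ∨ s ∈ q) →
      comp.Nodup →
      (∀ x : PvV, x ∈ (pvBfs g q vis comp).1 ↔ x ∈ V0 ∨ x ∈ (pvBfs g q vis comp).2) ∧
      (pvBfs g q vis comp).2.Nodup ∧
      (∀ x ∈ (pvBfs g q vis comp).2, PvReach edges V0 s x) ∧
      (∀ u ∈ (pvBfs g q vis comp).2, ∀ v : PvV, PvAdj edges u v → v ∉ V0 → v ∈ (pvBfs g q vis comp).2) ∧
      s ∈ (pvBfs g q vis comp).2 := by
  intro q vis comp
  fun_induction pvBfs g q vis comp with
  | case1 vis comp =>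
    intro h0 h1 h2 h3 h4 h5
    refine ⟨h0, h5, h1, ?_, ?_⟩
    · intro u hu v hadj hv
      rcases h3 u hu v hadj with hvv | hvq
      · rcases (h0 v).1 hvv with hv0 | hvc
        · exact absurd hv0 hv
        · exact hvc
      · simp at hvq
    · rcases h4 with hsv | hsq
      · rcases (h0 s).1 hsv with hs0 | hsc
        · exact absurd hs0 hs
        · exact hsc
      · simp at hsq
  | case2 vis comp n q' h ih =>
    intro h0 h1 h2 h3 h4 h5
    refine ih h0 h1 (fun x hx => h2 x (List.mem_cons.2 (Or.inr hx))) ?_ ?_ h5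
    · intro u hu v hadj
      rcases h3 u hu v hadj with hvv | hvq
      · exact Or.inl hvv
      · rcases List.mem_cons.1 hvq with rfl | hvq'
        · exact Or.inl h
        · exact Or.inr hvq'
    · rcases h4 with hsv | hsq
      · exact Or.inl hsv
      · rcases List.mem_cons.1 hsq with rfl | hsq'
        · exact Or.inl h
        · exact Or.inr hsq'
  | case3 vis comp n q' h ih =>
    intro h0 h1 h2 h3 h4 h5
    have hn0 : n ∉ V0 := by
      intro hv0
      exact h ((h0 n).2 (Or.inl hv0))
    have hnc : n ∉ comp := fun hc => h ((h0 n).2 (Or.inr hc))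
    have hrn : PvReach edges V0 s n := by
      rcases h2 n List.mem_cons_self with hv0 | hr
      · exact absurd hv0 hn0
      · exact hr
    refine ih ?_ ?_ ?_ ?_ ?_ ?_
    · intro x
      rw [PySem.Set.mem_add, PySem.Set.mem_add, h0 x]
      tauto
    · intro x hx
      rcases (PySem.Set.mem_add _ _ _).1 hx with hxc | rfl
      · exact h1 x hxc
      · exact hrn
    · intro x hx
      rcases List.mem_append.1 hx with hxq | hxg
      · exact h2 x (List.mem_cons.2 (Or.inr hxq))
      · have hadj : PvAdj edges n x := (hg n x).1 hxg
        by_cases hx0 : x ∈ V0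
        · exact Or.inl hx0
        · exact Or.inr (PvReach.step hrn hadj hx0)
    · intro u hu v hadj
      rcases (PySem.Set.mem_add _ _ _).1 hu with huc | rfl
      · rcases h3 u huc v hadj with hvv | hvq
        · exact Or.inl ((PySem.Set.mem_add _ _ _).2 (Or.inl hvv))
        · rcases List.mem_cons.1 hvq with rfl | hvq'
          · exact Or.inl ((PySem.Set.mem_add _ _ _).2 (Or.inr rfl))
          · exact Or.inr (List.mem_append.2 (Or.inl hvq'))
      · exact Or.inr (List.mem_append.2 (Or.inr ((hg u v).2 hadj)))
    · rcases h4 with hsv | hsq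
      · exact Or.inl ((PySem.Set.mem_add _ _ _).2 (Or.inl hsv))
      · rcases List.mem_cons.1 hsq with rfl | hsq'
        · exact Or.inl ((PySem.Set.mem_add _ _ _).2 (Or.inr rfl))
        · exact Or.inr (List.mem_append.2 (Or.inl hsq'))
    · exact PySem.Set.nodup_add _ _ h5

-- B-side: soundness, nodup, and fixpoint closure of the sweep
theorem pvStepF_sound {edges : List (PvV × PvV)} {vis : List PvV} {s : PvV}
    (e : PvV × PvV) (he : e ∈ edges) (c : List PvV)
    (hc : ∀ x ∈ c, PvReach edges vis s x) :
    ∀ x ∈ pvStepF vis c e, PvReach edges vis s x := by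
  unfold pvStepF pvStepF2
  intro x hx
  by_cases h1 : e.1 ∈ c ∧ e.2 ∉ vis ∧ e.2 ∉ c
  · rw [if_pos h1] at hx
    have hr2 : PvReach edges vis s e.2 :=
      PvReach.step (hc e.1 h1.1) ⟨e, he, Or.inl ⟨rfl, rfl⟩⟩ h1.2.1
    have hc1 : ∀ y ∈ c ++ [e.2], PvReach edges vis s y := by
      intro y hy
      rcases List.mem_append.1 hy with hy | hy
      · exact hc y hy
      · rw [List.mem_singleton.1 hy]; exact hr2
    by_cases h2 : e.2 ∈ c ++ [e.2] ∧ e.1 ∉ vis ∧ e.1 ∉ c ++ [e.2]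
    · rw [if_pos h2] at hx
      rcases List.mem_append.1 hx with hy | hy
      · exact hc1 x hy
      · rw [List.mem_singleton.1 hy]
        exact PvReach.step hr2 ⟨e, he, Or.inr ⟨rfl, rfl⟩⟩ h2.2.1
    · rw [if_neg h2] at hx
      exact hc1 x hx
  · rw [if_neg h1] at hx
    by_cases h2 : e.2 ∈ c ∧ e.1 ∉ vis ∧ e.1 ∉ c
    · rw [if_pos h2] at hx
      rcases List.mem_append.1 hx with hy | hy
      · exact hc x hy
      · rw [List.mem_singleton.1 hy]
        exact PvReach.step (hc e.2 h2.1) ⟨e, he, Or.inr ⟨rfl, rfl⟩⟩ h2.2.1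
    · rw [if_neg h2] at hx
      exact hc x hx

theorem pvFold_sound {edges : List (PvV × PvV)} {vis : List PvV} {s : PvV} :
    ∀ (l : List (PvV × PvV)), (∀ e ∈ l, e ∈ edges) →
      ∀ (c : List PvV), (∀ x ∈ c, PvReach edges vis s x) →
        ∀ x ∈ l.foldl (pvStepF vis) c, PvReach edges vis s x := by
  intro l
  induction l with
  | nil => intro _ c hc x hx; exact hc x hx
  | cons e l ih =>
    intro hl c hc x hx
    rw [List.foldl_cons] at hx
    exact ih (fun e' he' => hl e' (List.mem_cons.2 (Or.inr he')))
      (pvStepF vis c e) (pvStepF_sound e (hl e List.mem_cons_self) c hc) x hx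

theorem pv_nodup_snoc {l : List PvV} {x : PvV} (h : l.Nodup) (hx : x ∉ l) :
    (l ++ [x]).Nodup := by
  rw [List.nodup_append]
  refine ⟨h, List.nodup_singleton x, ?_⟩
  intro a ha b hb
  rw [List.mem_singleton] at hb
  exact fun hab => hx ((hab.trans hb) ▸ ha)

theorem pvStepF_nodup (vis : PySem.Set PvV) (c : List PvV) (e : PvV × PvV)
    (h : c.Nodup) : (pvStepF vis c e).Nodup := by
  unfold pvStepF pvStepF2
  by_cases h1 : e.1 ∈ c ∧ e.2 ∉ vis ∧ e.2 ∉ c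
  · rw [if_pos h1]
    have hc1 : (c ++ [e.2]).Nodup := pv_nodup_snoc h h1.2.2
    by_cases h2 : e.2 ∈ c ++ [e.2] ∧ e.1 ∉ vis ∧ e.1 ∉ c ++ [e.2]
    · rw [if_pos h2]
      exact pv_nodup_snoc hc1 h2.2.2
    · rw [if_neg h2]; exact hc1
  · rw [if_neg h1]
    by_cases h2 : e.2 ∈ c ∧ e.1 ∉ vis ∧ e.1 ∉ c
    · rw [if_pos h2]
      exact pv_nodup_snoc h h2.2.2
    · rw [if_neg h2]; exact h

theorem pvFold_nodup (vis : PySem.Set PvV) :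
    ∀ (l : List (PvV × PvV)) (c : List PvV), c.Nodup → (l.foldl (pvStepF vis) c).Nodup := by
  intro l
  induction l with
  | nil => intro c hc; exact hc
  | cons e l ih =>
    intro c hc
    rw [List.foldl_cons]
    exact ih _ (pvStepF_nodup vis c e hc)

theorem pvFold_mono (vis : PySem.Set PvV) (l : List (PvV × PvV)) (c : List PvV) :
    ∀ x ∈ c, x ∈ l.foldl (pvStepF vis) c := by
  obtain ⟨t, ht, _⟩ := pvFold_shape vis l c
  intro x hx
  rw [ht]; exact List.mem_append.2 (Or.inl hx)

theorem pvStepF_closes (vis : PySem.Set PvV) (c : List PvV) (e : PvV × PvV) (u v : PvV)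
    (hor : (e.1 = u ∧ e.2 = v) ∨ (e.1 = v ∧ e.2 = u))
    (hu : u ∈ c) (hv : v ∉ vis) : v ∈ pvStepF vis c e := by
  unfold pvStepF pvStepF2
  rcases hor with ⟨he1, he2⟩ | ⟨he1, he2⟩
  · subst he1; subst he2
    by_cases h1 : e.1 ∈ c ∧ e.2 ∉ vis ∧ e.2 ∉ c
    · rw [if_pos h1]
      have : e.2 ∈ c ++ [e.2] := List.mem_append.2 (Or.inr List.mem_cons_self)
      split_ifs with h2
      · exact List.mem_append.2 (Or.inl this)
      · exact this
    · have hvc : e.2 ∈ c := by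
        by_contra hvc
        exact h1 ⟨hu, hv, hvc⟩
      rw [if_neg h1]
      split_ifs with h2
      · exact List.mem_append.2 (Or.inl hvc)
      · exact hvc
  · subst he1; subst he2
    by_cases h1 : e.1 ∈ c ∧ e.2 ∉ vis ∧ e.2 ∉ c
    · rw [if_pos h1]
      split_ifs with h2
      · exact List.mem_append.2 (Or.inr List.mem_cons_self)
      · by_contra hvc
        exact h2 ⟨List.mem_append.2 (Or.inr List.mem_cons_self), hv, hvc⟩
    · rw [if_neg h1]
      by_cases h2 : e.2 ∈ c ∧ e.1 ∉ vis ∧ e.1 ∉ c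
      · rw [if_pos h2]
        exact List.mem_append.2 (Or.inr List.mem_cons_self)
      · rw [if_neg h2]
        by_contra hvc
        exact h2 ⟨hu, hv, hvc⟩

theorem pvFold_fix_closed (edges : List (PvV × PvV)) (vis : PySem.Set PvV) (comp : List PvV)
    (hfix : edges.foldl (pvStepF vis) comp = comp) :
    ∀ u ∈ comp, ∀ v : PvV, PvAdj edges u v → v ∉ vis → v ∈ comp := by
  intro u hu v hadj hv
  obtain ⟨e, he, hor⟩ := hadj
  obtain ⟨l1, l2, rfl⟩ := List.append_of_mem he
  rw [List.foldl_append, List.foldl_cons] at hfix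
  have hu1 : u ∈ l1.foldl (pvStepF vis) comp := pvFold_mono vis l1 comp u hu
  have hv1 : v ∈ pvStepF vis (l1.foldl (pvStepF vis) comp) e :=
    pvStepF_closes vis _ e u v hor hu1 hv
  have hv2 : v ∈ l2.foldl (pvStepF vis) (pvStepF vis (l1.foldl (pvStepF vis) comp) e) :=
    pvFold_mono vis l2 _ v hv1
  rw [hfix] at hv2
  exact hv2

theorem pvSweep_spec (edges : List (PvV × PvV)) (vis : PySem.Set PvV) (s : PvV) :
    ∀ (comp : List PvV), s ∈ comp → comp.Nodup → (∀ x ∈ comp, PvReach edges vis s x) →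
      s ∈ pvSweep edges vis comp ∧ (pvSweep edges vis comp).Nodup ∧
      (∀ x ∈ pvSweep edges vis comp, PvReach edges vis s x) ∧
      (∀ u ∈ pvSweep edges vis comp, ∀ v : PvV, PvAdj edges u v → v ∉ vis → v ∈ pvSweep edges vis comp) := by
  intro comp
  fun_induction pvSweep edges vis comp with
  | case1 comp h =>
    intro hs hn hsound
    exact ⟨hs, hn, hsound, pvFold_fix_closed edges vis comp (by simpa using h)⟩
  | case2 comp h ih =>
    intro hs hn hsound
    simp only [List.foldl_attach] at ih ⊢
    exact ih (pvFold_mono vis edges comp s hs) (pvFold_nodup vis edges comp hn)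
      (pvFold_sound edges (fun e he => he) comp hsound)

-- relation between the two outer-loop states
def PvRel (stA : PySem.Set PvV × List (PySem.Set PvV)) (stB : PySem.Set PvV × List (List PvV)) : Prop :=
  (∀ x : PvV, x ∈ stA.1 ↔ x ∈ stB.1) ∧
  List.Forall₂ (fun (cA : PySem.Set PvV) (cB : List PvV) =>
    cA.length = cB.length ∧ ∀ x : PvV, x ∈ cA ↔ x ∈ cB) stA.2 stB.2

theorem pv_forall₂_append {α β : Type} {R : α → β → Prop} {l1 l2 : List α} {m1 m2 : List β}
    (h1 : List.Forall₂ R l1 m1) (h2 : List.Forall₂ R l2 m2) :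
    List.Forall₂ R (l1 ++ l2) (m1 ++ m2) := by
  induction h1 with
  | nil => exact h2
  | cons h _ ih => exact List.Forall₂.cons h ih

theorem pvBfs_mem (edges : List (PvV × PvV)) (visA : PySem.Set PvV) (node : PvV)
    (h : node ∉ visA) :
    (∀ x : PvV, x ∈ (pvBfs (pvGraph edges) [node] visA PySem.Set.empty).1 ↔
        x ∈ visA ∨ x ∈ (pvBfs (pvGraph edges) [node] visA PySem.Set.empty).2) ∧
    (pvBfs (pvGraph edges) [node] visA PySem.Set.empty).2.Nodup ∧
    (∀ x : PvV, x ∈ (pvBfs (pvGraph edges) [node] visA PySem.Set.empty).2 ↔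
        PvReach edges visA node x) := by
  obtain ⟨h0', hnd, hsound, hclosed, hsmem⟩ :=
    pvBfs_spec (pvGraph edges) edges (pvGraph_spec edges) visA node h [node] visA
      PySem.Set.empty
      (fun x => by simp [PySem.Set.empty])
      (fun x hx => by simp [PySem.Set.empty] at hx)
      (fun x hx => Or.inr (by rw [List.mem_singleton.1 hx]; exact PvReach.base))
      (fun u hu => by simp [PySem.Set.empty] at hu)
      (Or.inr List.mem_cons_self)
      (by simp [PySem.Set.empty])
  exact ⟨h0', hnd, fun x => ⟨hsound x, pvReach_subset_closed hsmem hclosed x⟩⟩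

theorem pvSweep_mem (edges : List (PvV × PvV)) (visB : PySem.Set PvV) (node : PvV) :
    (pvSweep edges visB [node]).Nodup ∧
    (∀ x : PvV, x ∈ pvSweep edges visB [node] ↔ PvReach edges visB node x) := by
  obtain ⟨hsR, hnd, hsound, hclosed⟩ :=
    pvSweep_spec edges visB node [node] List.mem_cons_self (List.nodup_singleton _)
      (fun x hx => by rw [List.mem_singleton.1 hx]; exact PvReach.base)
  exact ⟨hnd, fun x => ⟨hsound x, pvReach_subset_closed hsR hclosed x⟩⟩

theorem pvOuter_rel (edges : List (PvV × PvV)) :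
    ∀ (ns : List PvV) (stA : PySem.Set PvV × List (PySem.Set PvV)) (stB : PySem.Set PvV × List (List PvV)),
      PvRel stA stB →
      PvRel (ns.foldl (fun st node =>
                if node ∈ st.1 then st
                else
                  let r := pvBfs (pvGraph edges) [node] st.1 PySem.Set.empty
                  (r.1, st.2 ++ [r.2])) stA)
            (ns.foldl (fun st node =>
                if node ∈ st.1 then st
                else
                  let comp := pvSweep edges st.1 [node]
                  (PySem.Set.update st.1 comp, st.2 ++ [comp])) stB) := by
  intro ns
  induction ns with
  | nil => intro stA stB h; exact h
  | cons node ns ih =>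
    intro stA stB hrel
    obtain ⟨hvis, hF⟩ := hrel
    rw [List.foldl_cons, List.foldl_cons]
    by_cases hmem : node ∈ stA.1
    · have hmemB : node ∈ stB.1 := (hvis node).1 hmem
      dsimp only
      rw [if_pos hmem, if_pos hmemB]
      exact ih stA stB ⟨hvis, hF⟩
    · have hmemB : node ∉ stB.1 := fun hb => hmem ((hvis node).2 hb)
      dsimp only
      rw [if_neg hmem, if_neg hmemB]
      obtain ⟨hA0, hAnd, hAmem⟩ := pvBfs_mem edges stA.1 node hmem
      obtain ⟨hBnd, hBmem⟩ := pvSweep_mem edges stB.1 node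
      have hcomp : ∀ x : PvV,
          x ∈ (pvBfs (pvGraph edges) [node] stA.1 PySem.Set.empty).2 ↔
          x ∈ pvSweep edges stB.1 [node] := by
        intro x
        rw [hAmem x, hBmem x]
        exact ⟨pvReach_congr (fun y => hvis y), pvReach_congr (fun y => (hvis y).symm)⟩
      apply ih
      constructor
      · intro x
        rw [PySem.Set.mem_update, hA0 x, hvis x, hcomp x]
      · exact pv_forall₂_append hF
          (List.forall₂_cons.2 ⟨⟨pv_len_eq hAnd hBnd hcomp, hcomp⟩, List.Forall₂.nil⟩)

-- ===== VERDICT (by name: the statement is the Claim_ definition above) =====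
theorem remove_smaller_component_spec : Claim_equal_remove_smaller_component := by
  intro nodes edges _
  unfold Spec_remove_smaller_component remove_smaller_component remove_smaller_component_alt
  dsimp only
  have key := pvOuter_rel edges nodes (PySem.Set.empty, []) (PySem.Set.empty, [])
    ⟨fun x => Iff.rfl, List.Forall₂.nil⟩
  dsimp only at key
  obtain ⟨hvis, hF⟩ := key
  have hlen := hF.length_eq
  by_cases h2 : (nodes.foldl (fun st node =>
      if node ∈ st.1 then st
      else ((pvBfs (pvGraph edges) [node] st.1 PySem.Set.empty).1,
            st.2 ++ [(pvBfs (pvGraph edges) [node] st.1 PySem.Set.empty).2]))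
      (PySem.Set.empty, [])).2.length = 2
  · have h2B : (nodes.foldl (fun st node =>
        if node ∈ st.1 then st
        else (PySem.Set.update st.1 (pvSweep edges st.1 [node]),
              st.2 ++ [pvSweep edges st.1 [node]]))
        (PySem.Set.empty, [])).2.length = 2 := by rw [← hlen]; exact h2
    obtain ⟨a1, a2, hAeq⟩ := List.length_eq_two.1 h2
    obtain ⟨b1, b2, hBeq⟩ := List.length_eq_two.1 h2B
    rw [hAeq, hBeq] at hF
    obtain ⟨⟨hl1, hm1⟩, hrest⟩ := List.forall₂_cons.1 hF
    obtain ⟨⟨hl2, hm2⟩, -⟩ := List.forall₂_cons.1 hrest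
    rw [hAeq, hBeq]
    rw [if_pos (by simp : ([a1, a2] : List (PySem.Set PvV)).length = 2),
        if_pos (by simp : ([b1, b2] : List (List PvV)).length = 2)]
    simp only [PySem.List.min?, List.getD_cons_zero, List.getD_cons_succ,
      PySem.List.len_eq, PySem.Set.len, List.foldl_cons, List.foldl_nil,
      Option.getD_some, Nat.cast_lt]
    simp only [hl1, hl2]
    by_cases hlt : b2.length < b1.length
    · simp only [if_pos hlt]
      refine Prod.ext ?_ ?_ <;> dsimp only
      · refine List.filter_congr ?_
        intro x _
        simp [PySem.Set.contains_eq_listContains, hm2 x, decide_not]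
      · refine List.filter_congr ?_
        intro e _
        simp [PySem.Set.contains_eq_listContains, hm2, decide_not]
    · simp only [if_neg hlt]
      refine Prod.ext ?_ ?_ <;> dsimp only
      · refine List.filter_congr ?_
        intro x _
        simp [PySem.Set.contains_eq_listContains, hm1 x, decide_not]
      · refine List.filter_congr ?_
        intro e _
        simp [PySem.Set.contains_eq_listContains, hm1, decide_not]
  · have h2B : ¬ (nodes.foldl (fun st node =>
        if node ∈ st.1 then st
        else (PySem.Set.update st.1 (pvSweep edges st.1 [node]),
              st.2 ++ [pvSweep edges st.1 [node]]))
        (PySem.Set.empty, [])).2.length = 2 := by rw [← hlen]; exact h2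
    rw [if_neg h2, if_neg h2B]
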